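-- pv_equiv track=rewrite | github.com/elsmirroad/Solutions | LeetCode/3912. Valid Elements in an Array.py | findValidElements
-- ===== SOURCE A (Python) =====
-- def findValidElements(nums: list[int]) -> list[int]:
--     s = set([0, len(nums) - 1])
--     left, right = nums[0], nums[-1]
--
--     for i in range(1, len(nums)):
--         if nums[i] > left: s.add(i)
--         left = max(left, nums[i])
--
--     for i in range(len(nums)-2, -1, -1):
--         if nums[i] > right: s.add(i)
--         right = max(right, nums[i])
--
--     return [nums[i] for i in sorted(s)]
-- ===== SOURCE B (Python) =====
-- def findValidElements(nums: list[int]) -> list[int]: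
--     n = len(nums)
--     # suffix-max table: suf[i] = max(nums[i:])
--     suf = nums[:]
--     for i in range(n - 2, -1, -1):
--         if suf[i + 1] > suf[i]:
--             suf[i] = suf[i + 1]
--
--     # single ordered emit pass: index i is valid iff it is an endpoint,
--     # or nums[i] beats the prefix max before it, or the suffix max after it
--     out = [nums[0]]
--     pm = nums[0]
--     for i in range(1, n - 1):
--         x = nums[i]
--         if x > pm or x > suf[i + 1]:
--             out.append(x)
--         if x > pm:
--             pm = x
--     if n > 1:
--         out.append(nums[n - 1])
--     return out
-- ===== Notes on version B (the rewrite author's own statement) =====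
-- stated objective: faster
-- what changed: Instead of A's two record-marking scans into a set plus a sort of the indices, B precomputes a suffix-max table and then emits the kept values directly in one ordered forward pass, deciding each index on the spot by 'value beats the running prefix max or the suffix max after it'; no index set, no sort.
import Mathlib
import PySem

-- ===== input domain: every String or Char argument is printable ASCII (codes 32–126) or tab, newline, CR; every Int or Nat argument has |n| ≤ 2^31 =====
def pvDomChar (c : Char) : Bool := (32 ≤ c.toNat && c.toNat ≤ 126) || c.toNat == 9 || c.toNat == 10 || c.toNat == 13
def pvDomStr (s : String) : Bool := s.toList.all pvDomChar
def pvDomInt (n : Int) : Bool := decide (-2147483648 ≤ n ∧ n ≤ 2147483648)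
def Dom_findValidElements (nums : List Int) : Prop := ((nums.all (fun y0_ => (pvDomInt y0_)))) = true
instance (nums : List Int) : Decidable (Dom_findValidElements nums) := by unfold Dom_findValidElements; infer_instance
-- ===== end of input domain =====

-- B replaces A's set-marking scans plus sort by a suffix-max table and one ordered emit pass (no sort).

-- ===== PORT A =====
-- Literal port of A: set s = {0, n-1}, forward scan adding i when nums[i] > running prefix max,
-- backward scan adding i when nums[i] > running suffix max, then values at sorted(s).
-- Indices looked up are always in range under Pre_ (nums ≠ []), so pyGetD with default 0 is exact.
def findValidElements (nums : List Int) : List Int :=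
  let n : Int := nums.length
  let s0 : PySem.Set Int := PySem.Set.ofList [0, n - 1]
  let left0 : Int := PySem.List.pyGetD nums 0 0
  let right0 : Int := PySem.List.pyGetD nums (-1) 0
  let fwd := (PySem.List.pyRange 1 n 1).foldl
    (fun (acc : PySem.Set Int × Int) i =>
      let x := PySem.List.pyGetD nums i 0
      (if x > acc.2 then PySem.Set.add acc.1 i else acc.1, max acc.2 x))
    (s0, left0)
  let bwd := (PySem.List.pyRange (n - 2) (-1) (-1)).foldl
    (fun (acc : PySem.Set Int × Int) i =>
      let x := PySem.List.pyGetD nums i 0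
      (if x > acc.2 then PySem.Set.add acc.1 i else acc.1, max acc.2 x))
    (fwd.1, right0)
  (PySem.List.sorted bwd.1 (fun x => x) false).map (fun i => PySem.List.pyGetD nums i 0)

-- ===== PORT B =====
-- Literal port of B: suffix-max table built backward in place over a copy nums[:],
-- then one forward pass that appends nums[i] when it beats the running prefix max or suf[i+1],
-- with nums[0] emitted first and nums[n-1] appended last (when n > 1).
def findValidElements_alt (nums : List Int) : List Int :=
  let n : Int := nums.length
  let suf := (PySem.List.pyRange (n - 2) (-1) (-1)).foldl
    (fun (s : List Int) i =>
      if PySem.List.pyGetD s (i + 1) 0 > PySem.List.pyGetD s i 0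
      then PySem.List.pySetD s i (PySem.List.pyGetD s (i + 1) 0) else s)
    (PySem.List.slice nums none none)
  let fwd := (PySem.List.pyRange 1 (n - 1) 1).foldl
    (fun (acc : List Int × Int) i =>
      let x := PySem.List.pyGetD nums i 0
      let out := if x > acc.2 ∨ x > PySem.List.pyGetD suf (i + 1) 0 then acc.1 ++ [x] else acc.1
      (out, if x > acc.2 then x else acc.2))
    ([PySem.List.pyGetD nums 0 0], PySem.List.pyGetD nums 0 0)
  if n > 1 then fwd.1 ++ [PySem.List.pyGetD nums (n - 1) 0] else fwd.1

-- ===== PRECONDITION & SPEC =====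
-- A raises IndexError on the empty list (nums[0]); B does too (nums[0]); Pre_ excludes it.
def Pre_findValidElements (nums : List Int) : Prop := nums ≠ []
instance (nums : List Int) : Decidable (Pre_findValidElements nums) := by unfold Pre_findValidElements; infer_instance
def pvWitness_findValidElements : List Int := [3, 1, 2]

def Spec_findValidElements (nums : List Int) (out : List Int) : Prop := out = findValidElements_alt nums
instance (nums : List Int) (out : List Int) : Decidable (Spec_findValidElements nums out) := by unfold Spec_findValidElements; infer_instance

-- ===== CLAIM (what is proved, stated in full; the proofs are below) =====
def Claim_equal_findValidElements : Prop := ∀ (nums : List Int), Dom_findValidElements nums → Pre_findValidElements nums → Spec_findValidElements nums (findValidElements nums)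

-- ===== LEMMAS AND PROOFS =====

-- prefM nums k = max of nums[0..k-1] (for 1 ≤ k ≤ n), seeded with nums[0]
def prefM (nums : List Int) (k : Nat) : Int := (nums.take k).foldl max (nums.getD 0 0)
-- sufM nums k = max of nums[k..n-1] (for 0 ≤ k ≤ n-1), seeded with nums[n-1]
def sufM (nums : List Int) (k : Nat) : Int := (nums.drop k).foldr max (nums.getD (nums.length - 1) 0)

-- the canonical validity predicate both programs compute
def Pfve (nums : List Int) (k : Nat) : Bool :=
  decide (k = 0 ∨ k = nums.length - 1 ∨ nums.getD k 0 > prefM nums k ∨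
          (k + 1 < nums.length ∧ nums.getD k 0 > sufM nums (k + 1)))

def canonFVE (nums : List Int) (f : Nat → Bool) : List Int :=
  ((List.range nums.length).filter f).map (fun k => nums.getD k 0)

theorem prefM_succ (nums : List Int) (k : Nat) (hk : k < nums.length) :
    prefM nums (k + 1) = max (prefM nums k) (nums.getD k 0) := by
  unfold prefM
  rw [List.take_add_one, List.getElem?_eq_getElem hk, List.foldl_append]
  simp [List.getD, List.getElem?_eq_getElem hk]

theorem prefM_one (nums : List Int) (h : nums ≠ []) : prefM nums 1 = nums.getD 0 0 := by
  cases nums with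
  | nil => simp at h
  | cons x xs => simp [prefM, List.getD]

theorem sufM_eq (nums : List Int) (k : Nat) (hk : k < nums.length) :
    sufM nums k = max (nums.getD k 0) (sufM nums (k + 1)) := by
  unfold sufM
  rw [List.drop_eq_getElem_cons hk, List.foldr_cons]
  simp [List.getD, List.getElem?_eq_getElem hk]

theorem sufM_last (nums : List Int) (h : nums ≠ []) :
    sufM nums (nums.length - 1) = nums.getD (nums.length - 1) 0 := by
  have hl : nums.length - 1 < nums.length := by
    have := List.length_pos_iff.mpr h; omega
  rw [sufM_eq nums _ hl]
  have : nums.drop (nums.length - 1 + 1) = [] := by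
    apply List.drop_eq_nil_of_le; omega
  unfold sufM
  rw [this]
  simp

theorem canonFVE_congr (nums : List Int) (f g : Nat → Bool)
    (h : ∀ k, k < nums.length → f k = g k) : canonFVE nums f = canonFVE nums g := by
  unfold canonFVE
  rw [List.filter_congr]
  intro k hk
  exact h k (List.mem_range.mp hk)

-- A's last step: sorted-set lookup equals the canonical map/filter form
theorem sorted_form (nums : List Int) (s : List Int) (hnd : s.Nodup)
    (hbd : ∀ x ∈ s, 0 ≤ x ∧ x < (nums.length : Int)) :
    (PySem.List.sorted s (fun x => x) false).map (fun i => PySem.List.pyGetD nums i 0)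
      = canonFVE nums (fun k : Nat => decide ((k : Int) ∈ s)) := by
  have hys : PySem.List.sorted s (fun x => x) false
      = ((List.range nums.length).filter (fun k : Nat => decide ((k : Int) ∈ s))).map
          (fun k : Nat => (k : Int)) := by
    apply PySem.List.sorted_eq_of_perm_of_pairwise_lt
    · rw [List.perm_ext_iff_of_nodup _ hnd]
      · intro a
        constructor
        · intro ha
          simp only [List.mem_map, List.mem_filter, List.mem_range, decide_eq_true_eq] at ha
          obtain ⟨k, ⟨_, hk2⟩, rfl⟩ := ha
          exact hk2
        · intro ha
          have hb := hbd a ha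
          refine List.mem_map.mpr ⟨a.toNat, List.mem_filter.mpr ⟨List.mem_range.mpr ?_, ?_⟩, ?_⟩
          · omega
          · simp only [decide_eq_true_eq]
            rwa [Int.toNat_of_nonneg hb.1]
          · rw [Int.toNat_of_nonneg hb.1]
      · refine List.Nodup.map ?_ (List.nodup_range.filter _)
        intro a b hab
        simpa using hab
    · refine List.Pairwise.map _ ?_ ((List.pairwise_lt_range).filter _)
      intro a b hab
      exact_mod_cast hab
  rw [hys, List.map_map]
  unfold canonFVE
  apply List.map_congr_left
  intro k hk
  have hk' : k < nums.length := List.mem_range.mp (List.mem_filter.mp hk).1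
  simp [PySem.List.pyGetD_natCast]

-- A's forward loop: characterize final set membership and keep nodup/bounds
theorem fwdA_char (nums : List Int) :
    ∀ (t : Nat) (a : Int) (s : PySem.Set Int), 1 ≤ a →
    t = ((nums.length : Int) - a).toNat →
    s.Nodup → (∀ x ∈ s, 0 ≤ x ∧ x < (nums.length : Int)) →
    ((((PySem.List.pyRange a (nums.length : Int) 1).foldl
        (fun (acc : PySem.Set Int × Int) i =>
          let x := PySem.List.pyGetD nums i 0
          (if x > acc.2 then PySem.Set.add acc.1 i else acc.1, max acc.2 x))
        (s, prefM nums a.toNat)).1.Nodup) ∧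
     (∀ x ∈ ((PySem.List.pyRange a (nums.length : Int) 1).foldl
        (fun (acc : PySem.Set Int × Int) i =>
          let x := PySem.List.pyGetD nums i 0
          (if x > acc.2 then PySem.Set.add acc.1 i else acc.1, max acc.2 x))
        (s, prefM nums a.toNat)).1, 0 ≤ x ∧ x < (nums.length : Int)) ∧
     (∀ x : Int, x ∈ ((PySem.List.pyRange a (nums.length : Int) 1).foldl
        (fun (acc : PySem.Set Int × Int) i =>
          let x := PySem.List.pyGetD nums i 0
          (if x > acc.2 then PySem.Set.add acc.1 i else acc.1, max acc.2 x))
        (s, prefM nums a.toNat)).1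
      ↔ x ∈ s ∨ (a ≤ x ∧ x < (nums.length : Int) ∧
          nums.getD x.toNat 0 > prefM nums x.toNat))) := by
  intro t
  induction t with
  | zero =>
    intro a s ha ht hnd hbd
    rw [PySem.List.pyRange_one_eq_nil (by omega : (nums.length : Int) ≤ a)]
    simp only [List.foldl_nil]
    refine ⟨hnd, hbd, fun x => ?_⟩
    constructor
    · exact Or.inl
    · rintro (h | ⟨h1, h2, _⟩)
      · exact h
      · omega
  | succ t ih =>
    intro a s ha ht hnd hbd
    have han : a < (nums.length : Int) := by omega
    have haN : a.toNat < nums.length := by omega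
    have hx : PySem.List.pyGetD nums a 0 = nums.getD a.toNat 0 :=
      PySem.List.pyGetD_of_nonneg nums 0 (by omega)
    rw [PySem.List.pyRange_one_cons han]
    simp only [List.foldl_cons]
    have hmax : max (prefM nums a.toNat) (PySem.List.pyGetD nums a 0)
        = prefM nums (a + 1).toNat := by
      rw [hx, ← prefM_succ nums a.toNat haN]
      congr 1
      omega
    by_cases hc : PySem.List.pyGetD nums a 0 > prefM nums a.toNat
    · simp only [hc, if_pos, hmax]
      obtain ⟨h1, h2, h3⟩ := ih (a + 1) (PySem.Set.add s a) (by omega) (by omega)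
        (PySem.Set.nodup_add _ _ hnd)
        (by
          intro x hxm
          rcases (PySem.Set.mem_add _ _ _).mp hxm with h | h
          · exact hbd x h
          · subst h; omega)
      refine ⟨h1, h2, fun x => ?_⟩
      rw [h3 x, PySem.Set.mem_add]
      constructor
      · rintro ((h | hxa) | ⟨h4, h5, h6⟩)
        · exact Or.inl h
        · refine Or.inr ⟨by omega, by omega, ?_⟩
          rw [hxa]
          rwa [hx] at hc
        · exact Or.inr ⟨by omega, h5, h6⟩
      · rintro (h | ⟨h4, h5, h6⟩)
        · exact Or.inl (Or.inl h)
        · by_cases hxa : x = a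
          · exact Or.inl (Or.inr hxa)
          · exact Or.inr ⟨by omega, h5, h6⟩
    · simp only [hc, if_false, hmax]
      obtain ⟨h1, h2, h3⟩ := ih (a + 1) s (by omega) (by omega) hnd hbd
      refine ⟨h1, h2, fun x => ?_⟩
      rw [h3 x]
      constructor
      · rintro (h | ⟨h4, h5, h6⟩)
        · exact Or.inl h
        · exact Or.inr ⟨by omega, h5, h6⟩
      · rintro (h | ⟨h4, h5, h6⟩)
        · exact Or.inl h
        · by_cases hxa : x = a
          · subst hxa
            rw [hx] at hc
            omega
          · exact Or.inr ⟨by omega, h5, h6⟩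

-- A's backward loop: same for the suffix scan
theorem bwdA_char (nums : List Int) :
    ∀ (t : Nat) (a : Int) (s : PySem.Set Int), a ≤ (nums.length : Int) - 2 →
    t = (a + 1).toNat →
    s.Nodup → (∀ x ∈ s, 0 ≤ x ∧ x < (nums.length : Int)) →
    ((((PySem.List.pyRange a (-1) (-1)).foldl
        (fun (acc : PySem.Set Int × Int) i =>
          let x := PySem.List.pyGetD nums i 0
          (if x > acc.2 then PySem.Set.add acc.1 i else acc.1, max acc.2 x))
        (s, sufM nums (a + 1).toNat)).1.Nodup) ∧
     (∀ x ∈ ((PySem.List.pyRange a (-1) (-1)).foldl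
        (fun (acc : PySem.Set Int × Int) i =>
          let x := PySem.List.pyGetD nums i 0
          (if x > acc.2 then PySem.Set.add acc.1 i else acc.1, max acc.2 x))
        (s, sufM nums (a + 1).toNat)).1, 0 ≤ x ∧ x < (nums.length : Int)) ∧
     (∀ x : Int, x ∈ ((PySem.List.pyRange a (-1) (-1)).foldl
        (fun (acc : PySem.Set Int × Int) i =>
          let x := PySem.List.pyGetD nums i 0
          (if x > acc.2 then PySem.Set.add acc.1 i else acc.1, max acc.2 x))
        (s, sufM nums (a + 1).toNat)).1
      ↔ x ∈ s ∨ (0 ≤ x ∧ x ≤ a ∧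
          nums.getD x.toNat 0 > sufM nums (x.toNat + 1)))) := by
  intro t
  induction t with
  | zero =>
    intro a s ha ht hnd hbd
    rw [PySem.List.pyRange_neg_one_eq_nil (by omega : a ≤ -1)]
    simp only [List.foldl_nil]
    refine ⟨hnd, hbd, fun x => ?_⟩
    constructor
    · exact Or.inl
    · rintro (h | ⟨h1, h2, _⟩)
      · exact h
      · omega
  | succ t ih =>
    intro a s ha ht hnd hbd
    have ha0 : 0 ≤ a := by omega
    have haN : a.toNat < nums.length := by omega
    have hx : PySem.List.pyGetD nums a 0 = nums.getD a.toNat 0 :=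
      PySem.List.pyGetD_of_nonneg nums 0 ha0
    rw [PySem.List.pyRange_neg_one_cons (by omega : (-1 : Int) < a)]
    simp only [List.foldl_cons]
    have hmax : max (sufM nums (a + 1).toNat) (PySem.List.pyGetD nums a 0)
        = sufM nums (a - 1 + 1).toNat := by
      rw [hx]
      have h1 : (a + 1).toNat = a.toNat + 1 := by omega
      have h2 : (a - 1 + 1).toNat = a.toNat := by omega
      rw [h1, h2, sufM_eq nums a.toNat haN, max_comm]
    by_cases hc : PySem.List.pyGetD nums a 0 > sufM nums (a + 1).toNat
    · simp only [hc, if_pos, hmax]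
      obtain ⟨h1, h2, h3⟩ := ih (a - 1) (PySem.Set.add s a) (by omega) (by omega)
        (PySem.Set.nodup_add _ _ hnd)
        (by
          intro x hxm
          rcases (PySem.Set.mem_add _ _ _).mp hxm with h | h
          · exact hbd x h
          · subst h; omega)
      refine ⟨h1, h2, fun x => ?_⟩
      rw [h3 x, PySem.Set.mem_add]
      constructor
      · rintro ((h | hxa) | ⟨h4, h5, h6⟩)
        · exact Or.inl h
        · refine Or.inr ⟨by omega, by omega, ?_⟩
          rw [hxa]
          have he : (a + 1).toNat = a.toNat + 1 := by omega
          rwa [hx, he] at hc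
        · exact Or.inr ⟨h4, by omega, h6⟩
      · rintro (h | ⟨h4, h5, h6⟩)
        · exact Or.inl (Or.inl h)
        · by_cases hxa : x = a
          · exact Or.inl (Or.inr hxa)
          · exact Or.inr ⟨h4, by omega, h6⟩
    · simp only [hc, if_false, hmax]
      obtain ⟨h1, h2, h3⟩ := ih (a - 1) s (by omega) (by omega) hnd hbd
      refine ⟨h1, h2, fun x => ?_⟩
      rw [h3 x]
      constructor
      · rintro (h | ⟨h4, h5, h6⟩)
        · exact Or.inl h
        · exact Or.inr ⟨h4, by omega, h6⟩
      · rintro (h | ⟨h4, h5, h6⟩)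
        · exact Or.inl h
        · by_cases hxa : x = a
          · exfalso
            rw [hxa] at h6
            rw [hx] at hc
            have he : (a + 1).toNat = a.toNat + 1 := by omega
            rw [he] at hc
            omega
          · exact Or.inr ⟨h4, by omega, h6⟩

-- B's table loop: the backward in-place pass computes the suffix maxima
theorem sufTab_char (nums : List Int) :
    ∀ (t : Nat) (a : Int) (s : List Int), -1 ≤ a → a ≤ (nums.length : Int) - 2 →
    t = (a + 1).toNat →
    s.length = nums.length →
    (∀ k : Nat, k < nums.length →
      s.getD k 0 = if a < (k : Int) then sufM nums k else nums.getD k 0) →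
    (((PySem.List.pyRange a (-1) (-1)).foldl
        (fun (s : List Int) i =>
          if PySem.List.pyGetD s (i + 1) 0 > PySem.List.pyGetD s i 0
          then PySem.List.pySetD s i (PySem.List.pyGetD s (i + 1) 0) else s) s).length
        = nums.length ∧
     ∀ k : Nat, k < nums.length →
      ((PySem.List.pyRange a (-1) (-1)).foldl
        (fun (s : List Int) i =>
          if PySem.List.pyGetD s (i + 1) 0 > PySem.List.pyGetD s i 0
          then PySem.List.pySetD s i (PySem.List.pyGetD s (i + 1) 0) else s) s).getD k 0
        = sufM nums k) := by
  intro t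
  induction t with
  | zero =>
    intro a s ham ha ht hlen hinv
    rw [PySem.List.pyRange_neg_one_eq_nil (by omega : a ≤ -1)]
    simp only [List.foldl_nil]
    refine ⟨hlen, fun k hk => ?_⟩
    rw [hinv k hk, if_pos (by omega : a < (k : Int))]
  | succ t ih =>
    intro a s ham ha ht hlen hinv
    have ha0 : 0 ≤ a := by omega
    have haN : a.toNat < nums.length := by omega
    have haN1 : a.toNat + 1 < nums.length ∨ a.toNat + 1 = nums.length := by omega
    have haN1' : a.toNat + 1 ≤ nums.length - 1 := by omega
    have hget_a : PySem.List.pyGetD s a 0 = nums.getD a.toNat 0 := by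
      rw [PySem.List.pyGetD_of_nonneg s 0 ha0, hinv a.toNat haN,
        if_neg (by omega : ¬ a < (a.toNat : Int))]
    have hk1 : a.toNat + 1 < nums.length := by omega
    have hget_a1 : PySem.List.pyGetD s (a + 1) 0 = sufM nums (a.toNat + 1) := by
      rw [PySem.List.pyGetD_of_nonneg s 0 (by omega : (0:Int) ≤ a + 1)]
      have he : (a + 1).toNat = a.toNat + 1 := by omega
      rw [he, hinv (a.toNat + 1) hk1, if_pos (by omega : a < ((a.toNat + 1 : Nat) : Int))]
    have hsufa : sufM nums a.toNat = max (nums.getD a.toNat 0) (sufM nums (a.toNat + 1)) :=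
      sufM_eq nums a.toNat haN
    rw [PySem.List.pyRange_neg_one_cons (by omega : (-1 : Int) < a)]
    simp only [List.foldl_cons]
    by_cases hc : PySem.List.pyGetD s (a + 1) 0 > PySem.List.pyGetD s a 0
    · simp only [hc, if_pos]
      apply ih (a - 1) _ (by omega) (by omega) (by omega)
      · rw [PySem.List.length_pySetD, hlen]
      · intro k hk
        rw [PySem.List.pySetD_of_nonneg s _ ha0]
        by_cases hka : k = a.toNat
        · subst hka
          rw [List.getD, List.getElem?_set_self (by omega : a.toNat < s.length)]
          rw [hget_a1, hget_a] at hc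
          simp only [Option.getD_some]
          rw [if_pos (by omega : a - 1 < ((a.toNat : Nat) : Int)), hsufa]
          omega
        · rw [List.getD, List.getElem?_set_ne (by omega : a.toNat ≠ k), ← List.getD, hinv k hk]
          have : (a < (k : Int)) ↔ (a - 1 < (k : Int)) := by omega
          rw [if_congr this rfl rfl]
    · simp only [hc, if_false]
      apply ih (a - 1) s (by omega) (by omega) (by omega) hlen
      intro k hk
      rw [hinv k hk]
      by_cases hka : k = a.toNat
      · subst hka
        rw [if_neg (by omega : ¬ a < ((a.toNat : Nat) : Int)),
          if_pos (by omega : a - 1 < ((a.toNat : Nat) : Int))]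
        rw [hget_a1, hget_a] at hc
        omega
      · have : (a < (k : Int)) ↔ (a - 1 < (k : Int)) := by omega
        rw [if_congr this rfl rfl]

-- B's emit loop: appends exactly the values at indices satisfying the validity test
theorem fwdB_char (nums : List Int) (suf : List Int)
    (hsuf : ∀ k : Nat, k < nums.length → suf.getD k 0 = sufM nums k) :
    ∀ (t : Nat) (a : Int) (out : List Int), 1 ≤ a →
    t = ((nums.length : Int) - 1 - a).toNat →
    ((PySem.List.pyRange a ((nums.length : Int) - 1) 1).foldl
      (fun (acc : List Int × Int) i =>
        let x := PySem.List.pyGetD nums i 0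
        let o := if x > acc.2 ∨ x > PySem.List.pyGetD suf (i + 1) 0 then acc.1 ++ [x] else acc.1
        (o, if x > acc.2 then x else acc.2)) (out, prefM nums a.toNat)).1
    = out ++ ((List.range' a.toNat ((nums.length : Int) - 1 - a).toNat).filter
        (fun k => decide (nums.getD k 0 > prefM nums k ∨ nums.getD k 0 > sufM nums (k + 1)))).map
        (fun k => nums.getD k 0) := by
  intro t
  induction t with
  | zero =>
    intro a out ha ht
    rw [PySem.List.pyRange_one_eq_nil (by omega : (nums.length : Int) - 1 ≤ a), ← ht]
    simp
  | succ t ih =>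
    intro a out ha ht
    have han : a < (nums.length : Int) - 1 := by omega
    have haN : a.toNat < nums.length := by omega
    have hx : PySem.List.pyGetD nums a 0 = nums.getD a.toNat 0 :=
      PySem.List.pyGetD_of_nonneg nums 0 (by omega)
    have hk1 : (a + 1).toNat < nums.length := by omega
    have hs : PySem.List.pyGetD suf (a + 1) 0 = sufM nums (a.toNat + 1) := by
      rw [PySem.List.pyGetD_of_nonneg suf 0 (by omega : (0:Int) ≤ a + 1), hsuf _ hk1]
      congr 1
      omega
    rw [PySem.List.pyRange_one_cons han]
    simp only [List.foldl_cons]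
    have hpm : (if PySem.List.pyGetD nums a 0 > prefM nums a.toNat
        then PySem.List.pyGetD nums a 0 else prefM nums a.toNat) = prefM nums (a + 1).toNat := by
      have he : (a + 1).toNat = a.toNat + 1 := by omega
      rw [he, prefM_succ nums a.toNat haN, hx]
      split_ifs <;> omega
    have hcond : (PySem.List.pyGetD nums a 0 > prefM nums a.toNat ∨
        PySem.List.pyGetD nums a 0 > PySem.List.pyGetD suf (a + 1) 0)
        ↔ (nums.getD a.toNat 0 > prefM nums a.toNat ∨
           nums.getD a.toNat 0 > sufM nums (a.toNat + 1)) := by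
      rw [hx, hs]
    have he1 : (a + 1).toNat = a.toNat + 1 := by omega
    have he2 : ((nums.length : Int) - 1 - (a + 1)).toNat = t := by omega
    have he3 : ((nums.length : Int) - 1 - a).toNat = t + 1 := by omega
    by_cases hc : PySem.List.pyGetD nums a 0 > prefM nums a.toNat ∨
        PySem.List.pyGetD nums a 0 > PySem.List.pyGetD suf (a + 1) 0
    · simp only [hc, if_pos, hpm]
      rw [ih (a + 1) _ (by omega) (by omega), he1, he2, he3, List.range'_succ, List.filter_cons,
        if_pos (decide_eq_true (hcond.mp hc))]
      simp [hx]
    · simp only [hc, if_false, hpm]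
      rw [ih (a + 1) _ (by omega) (by omega), he1, he2, he3, List.range'_succ, List.filter_cons,
        if_neg (by simpa using fun h => hc (hcond.mpr h))]

-- prefM at the endpoints
theorem prefM_zero (nums : List Int) : prefM nums 0 = nums.getD 0 0 := by
  simp [prefM]

theorem A_canon (nums : List Int) (hpre : nums ≠ []) :
    findValidElements nums = canonFVE nums (Pfve nums) := by
  have hn : 1 ≤ nums.length := List.length_pos_iff.mpr hpre
  simp only [findValidElements]
  have hleft : PySem.List.pyGetD nums 0 0 = prefM nums ((1 : Int)).toNat := by
    rw [PySem.List.pyGetD_of_nonneg nums 0 (by omega)]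
    rw [(by rfl : ((1 : Int)).toNat = 1), prefM_one nums hpre]
    rfl
  have he : (((nums.length : Int) - 2) + 1).toNat = nums.length - 1 := by omega
  have hright : PySem.List.pyGetD nums (-1) 0
      = sufM nums ((((nums.length : Int) - 2) + 1)).toNat := by
    rw [PySem.List.pyGetD_neg_one nums 0 hpre, he, sufM_last nums hpre,
      List.getLast_eq_getElem, List.getD, List.getElem?_eq_getElem (by omega)]
    rfl
  rw [hleft, hright]
  have hnd0 : (PySem.Set.ofList [0, (nums.length : Int) - 1]).Nodup := PySem.Set.nodup_ofList _
  have hbd0 : ∀ x ∈ PySem.Set.ofList [0, (nums.length : Int) - 1],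
      0 ≤ x ∧ x < (nums.length : Int) := by
    intro x hx
    have := (PySem.Set.mem_ofList _ _).mp hx
    simp only [List.mem_cons, List.not_mem_nil, or_false] at this
    rcases this with rfl | rfl <;> omega
  obtain ⟨hnd1, hbd1, hmem1⟩ := fwdA_char nums (((nums.length : Int) - 1)).toNat 1
    (PySem.Set.ofList [0, (nums.length : Int) - 1]) (le_refl 1) rfl hnd0 hbd0
  obtain ⟨hnd2, hbd2, hmem2⟩ := bwdA_char nums ((((nums.length : Int) - 2) + 1)).toNat
    ((nums.length : Int) - 2) _ (by omega) rfl hnd1 hbd1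
  rw [sorted_form nums _ hnd2 hbd2]
  apply canonFVE_congr
  intro k hk
  rw [Pfve]
  apply decide_eq_decide.mpr
  rw [hmem2 ((k : Int)), hmem1 ((k : Int)), PySem.Set.mem_ofList]
  simp only [List.mem_cons, List.not_mem_nil, or_false, Int.toNat_natCast]
  constructor
  · rintro (((h | h) | ⟨h1, h2, h3⟩) | ⟨h1, h2, h3⟩)
    · exact Or.inl (by omega)
    · exact Or.inr (Or.inl (by omega))
    · exact Or.inr (Or.inr (Or.inl h3))
    · exact Or.inr (Or.inr (Or.inr ⟨by omega, h3⟩))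
  · rintro (rfl | h | h | ⟨h1, h2⟩)
    · exact Or.inl (Or.inl (Or.inl (by simp)))
    · exact Or.inl (Or.inl (Or.inr (by omega)))
    · by_cases hk0 : k = 0
      · exfalso
        rw [hk0, prefM_zero] at h
        omega
      · exact Or.inl (Or.inr ⟨by omega, by omega, h⟩)
    · exact Or.inr ⟨by omega, by omega, h2⟩

theorem B_canon (nums : List Int) (hpre : nums ≠ []) :
    findValidElements_alt nums = canonFVE nums (Pfve nums) := by
  have hn : 1 ≤ nums.length := List.length_pos_iff.mpr hpre
  simp only [findValidElements_alt, PySem.List.slice_none_none]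
  have hinv0 : ∀ k : Nat, k < nums.length →
      nums.getD k 0 = if (nums.length : Int) - 2 < (k : Int) then sufM nums k
        else nums.getD k 0 := by
    intro k hk
    by_cases hkc : (nums.length : Int) - 2 < (k : Int)
    · rw [if_pos hkc]
      have hke : k = nums.length - 1 := by omega
      rw [hke, sufM_last nums hpre]
    · rw [if_neg hkc]
  obtain ⟨hlen, hsuf⟩ := sufTab_char nums ((((nums.length : Int) - 2) + 1)).toNat
    ((nums.length : Int) - 2) nums (by omega) (by omega) rfl rfl hinv0
  have hleft : PySem.List.pyGetD nums 0 0 = prefM nums ((1 : Int)).toNat := by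
    rw [PySem.List.pyGetD_of_nonneg nums 0 (by omega)]
    rw [(by rfl : ((1 : Int)).toNat = 1), prefM_one nums hpre]
    rfl
  rw [hleft, fwdB_char nums _ hsuf (((nums.length : Int) - 1 - 1)).toNat 1 _ (le_refl 1) rfl]
  have ht1 : ((1 : Int)).toNat = 1 := rfl
  have hgl : prefM nums ((1 : Int)).toNat = nums.getD 0 0 := by
    rw [ht1, prefM_one nums hpre]
  have hmid : (((nums.length : Int) - 1 - 1)).toNat = nums.length - 2 := by omega
  by_cases h2 : 2 ≤ nums.length
  · rw [if_pos (by exact_mod_cast (by omega : (1 : Int) < (nums.length : Int)))]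
    have hglast : PySem.List.pyGetD nums ((nums.length : Int) - 1) 0
        = nums.getD (nums.length - 1) 0 := by
      rw [PySem.List.pyGetD_of_nonneg nums 0 (by omega)]
      congr 1
      omega
    have hrange : List.range nums.length
        = 0 :: (List.range' 1 (nums.length - 2) ++ [nums.length - 1]) := by
      conv_lhs => rw [(by omega : nums.length = ((nums.length - 2) + 1) + 1)]
      rw [List.range_succ, List.range_eq_range', List.range'_succ]
      simp only [List.cons_append]
      have h01 : (0 : Nat) + 1 = 1 := rfl
      have hlast : (nums.length - 2) + 1 = nums.length - 1 := by omega
      rw [h01, hlast]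
    have hP0 : Pfve nums 0 = true := decide_eq_true (Or.inl rfl)
    have hPl : Pfve nums (nums.length - 1) = true := decide_eq_true (Or.inr (Or.inl rfl))
    have hPm : ∀ k ∈ List.range' 1 (nums.length - 2), Pfve nums k
        = decide (nums.getD k 0 > prefM nums k ∨ nums.getD k 0 > sufM nums (k + 1)) := by
      intro k hkm
      have hkb := List.mem_range'.mp hkm
      apply decide_eq_decide.mpr
      constructor
      · rintro (h | h | h | ⟨_, h⟩)
        · omega
        · omega
        · exact Or.inl h
        · exact Or.inr h
      · rintro (h | h)
        · exact Or.inr (Or.inr (Or.inl h))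
        · exact Or.inr (Or.inr (Or.inr ⟨by omega, h⟩))
    rw [canonFVE, hrange, List.filter_cons, if_pos hP0, List.filter_append,
      List.filter_congr hPm, List.filter_cons, if_pos hPl, List.filter_nil]
    rw [hgl, hglast, hmid]
    simp
  · have h1 : nums.length = 1 := by omega
    rw [if_neg (by omega : ¬ ((nums.length : Int) > 1))]
    rw [hgl, hmid, h1]
    simp only [(by omega : 1 - 2 = 0), List.range'_zero, List.filter_nil,
      List.map_nil, List.append_nil]
    have hP0 : Pfve nums 0 = true := decide_eq_true (Or.inl rfl)
    rw [canonFVE, h1, List.range_one, List.filter_cons, if_pos hP0, List.filter_nil]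
    simp

theorem findValidElements_spec : Claim_equal_findValidElements := by
  intro nums _ hpre
  unfold Pre_findValidElements at hpre
  unfold Spec_findValidElements
  rw [A_canon nums hpre, B_canon nums hpre]
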